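-- pv_equiv track=rewrite | github.com/ramakristipati/SPyTest_SA_UPSTREAM | apis/yang/utils/gnmi.py | remove_module_name_from_xpath
-- ===== SOURCE A (Python) =====
-- def remove_module_name_from_xpath(path):
--     # return path
--     rv = []
--     for e in path.split("/"):
--         if ":" in e:
--             rv.append(e.split(":", 1)[1])
--         else:
--             rv.append(e)
--     frv = '/'.join(rv)
--     return frv
-- ===== SOURCE B (Python) =====
-- def remove_module_name_from_xpath(path):
--     # One pass over the characters: buffer the current segment's prefix and
--     # drop it when the segment's first ':' appears; no split/join.
--     out = []
--     buf = []
--     seen = False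
--     for ch in path:
--         if ch == '/':
--             out.extend(buf)
--             out.append('/')
--             buf = []
--             seen = False
--         elif ch == ':' and not seen:
--             buf = []
--             seen = True
--         else:
--             buf.append(ch)
--     out.extend(buf)
--     return ''.join(out)
-- ===== Notes on version B (the rewrite author's own statement) =====
-- stated objective: alternative
-- what changed: Replaced split('/') + per-segment split(':',1)[1] + '/'.join with a single character-by-character pass that buffers each segment's prefix and drops it at the segment's first ':'.
import Mathlib
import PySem

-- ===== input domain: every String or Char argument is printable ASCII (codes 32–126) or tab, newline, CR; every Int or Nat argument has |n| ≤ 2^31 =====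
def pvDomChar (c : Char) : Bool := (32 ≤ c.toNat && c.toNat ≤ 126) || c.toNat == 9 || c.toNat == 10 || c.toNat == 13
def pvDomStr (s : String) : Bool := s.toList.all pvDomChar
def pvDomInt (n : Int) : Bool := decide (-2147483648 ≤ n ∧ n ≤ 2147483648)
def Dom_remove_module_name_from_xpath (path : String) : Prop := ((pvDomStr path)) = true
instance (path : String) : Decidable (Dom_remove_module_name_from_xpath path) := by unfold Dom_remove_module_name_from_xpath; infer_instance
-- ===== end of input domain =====

-- B replaces A's split('/') / per-segment split(':',1) / join with a single character pass
-- that drops each segment's prefix up to its first ':' (objective: alternative single-pass form).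

-- ===== PORT A =====
-- e.split(":", 1)[1] in the branch where ":" in e: the split has exactly two pieces,
-- so the [1] index never raises; the `none` arm of pyGet? is unreachable there.
def pvSegA (e : List Char) : List Char :=
  if PySem.Chars.isIn [':'] e then
    match PySem.List.pyGet? (PySem.Chars.splitOnMax e [':'] 1) 1 with
    | some x => x
    | none => []
  else e

def remove_module_name_from_xpath (path : String) : String :=
  let rv : List (List Char) :=
    (PySem.Chars.splitOn path.toList ['/']).foldl (fun rv e => rv ++ [pvSegA e]) []
  String.ofList (PySem.Chars.join ['/'] rv)

-- ===== PORT B =====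
def pvStepB (s : List Char × List Char × Bool) (ch : Char) : List Char × List Char × Bool :=
  if ch == '/' then (s.1 ++ s.2.1 ++ ['/'], [], false)
  else if ch == ':' && !s.2.2 then (s.1, [], true)
  else (s.1, s.2.1 ++ [ch], s.2.2)

def remove_module_name_from_xpath_alt (path : String) : String :=
  let r := path.toList.foldl pvStepB ([], [], false)
  String.ofList (r.1 ++ r.2.1)

-- ===== PRECONDITION & SPEC =====
def Spec_remove_module_name_from_xpath (path : String) (out : String) : Prop := out = remove_module_name_from_xpath_alt path
instance (path : String) (out : String) : Decidable (Spec_remove_module_name_from_xpath path out) := by unfold Spec_remove_module_name_from_xpath; infer_instance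

-- ===== CLAIM (what is proved, stated in full; the proofs are below) =====
def Claim_equal_remove_module_name_from_xpath : Prop := ∀ (path : String), Dom_remove_module_name_from_xpath path → Spec_remove_module_name_from_xpath path (remove_module_name_from_xpath path)

-- ===== LEMMAS AND PROOFS =====

-- Python split("/") as plain structural recursion, segment accumulated in order.
def pvSplits : List Char → List Char → List (List Char)
  | [], cur => [cur]
  | c :: r, cur => if c = '/' then cur :: pvSplits r [] else pvSplits r (cur ++ [c])

-- What A does to one segment.
def pvSegF (e : List Char) : List Char :=
  if ':' ∈ e then (e.dropWhile (· != ':')).tail else e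

-- B's remaining output, before (pvBF) / after (pvBT) the current segment's first ':'.
mutual
def pvBF : List Char → List Char → List Char
  | [], buf => buf
  | c :: r, buf => if c = '/' then buf ++ '/' :: pvBF r [] else if c = ':' then pvBT r else pvBF r (buf ++ [c])
def pvBT : List Char → List Char
  | [] => []
  | c :: r => if c = '/' then '/' :: pvBF r [] else c :: pvBT r
end

theorem pvFoldlAppendMap {α β : Type} (f : α → β) :
    ∀ (l : List α) (a : List β), l.foldl (fun r e => r ++ [f e]) a = a ++ l.map f := by
  intro l; induction l with
  | nil => simp
  | cons x xs ih => intro a; simp [List.foldl, ih]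

theorem pvSplitOnGoSpec :
    ∀ (fuel : Nat) (l cur : List Char) (acc : List (List Char)), l.length ≤ fuel →
      PySem.Chars.splitOn.go ['/'] fuel l cur acc = acc.reverse ++ pvSplits l cur.reverse := by
  intro fuel
  induction fuel with
  | zero =>
    intro l cur acc h
    have : l = [] := List.eq_nil_of_length_eq_zero (Nat.le_zero.mp h)
    subst this; simp [PySem.Chars.splitOn.go, pvSplits]
  | succ n ih =>
    intro l cur acc h
    cases l with
    | nil => simp [PySem.Chars.splitOn.go, pvSplits]
    | cons c r =>
      by_cases hc : c = '/'
      · subst hc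
        have hpre : List.isPrefixOf ['/'] ('/' :: r) = true := by simp [List.isPrefixOf]
        simp only [PySem.Chars.splitOn.go, hpre, if_pos, List.length_cons, List.drop_succ_cons,
          List.length_nil, List.drop_zero]
        rw [ih r [] (cur.reverse :: acc) (by simpa using Nat.le_of_succ_le_succ h)]
        simp [pvSplits]
      · have hpre : List.isPrefixOf ['/'] (c :: r) = false := by
          simp [List.isPrefixOf]; exact fun hh => hc hh.symm
        simp only [PySem.Chars.splitOn.go]
        rw [if_neg (by simp [hpre])]
        rw [ih r (c :: cur) acc (by simpa using Nat.le_of_succ_le_succ h)]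
        simp [pvSplits, hc]

theorem pvSplitOnEq (l : List Char) :
    PySem.Chars.splitOn l ['/'] = pvSplits l [] := by
  unfold PySem.Chars.splitOn
  simpa using pvSplitOnGoSpec (l.length + 1) l [] [] (Nat.le_succ _)

theorem pvGoMax0 :
    ∀ (fuel : Nat) (l cur : List Char) (acc : List (List Char)),
      PySem.Chars.splitOnMax.go [':'] fuel 0 l cur acc = ((cur.reverse ++ l) :: acc).reverse := by
  intro fuel
  induction fuel with
  | zero => intro l cur acc; simp [PySem.Chars.splitOnMax.go]
  | succ n _ => intro l cur acc; cases l <;> simp [PySem.Chars.splitOnMax.go]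

theorem pvGoMax1 :
    ∀ (fuel : Nat) (l cur : List Char) (acc : List (List Char)), l.length ≤ fuel → ':' ∈ l →
      PySem.Chars.splitOnMax.go [':'] fuel 1 l cur acc =
        acc.reverse ++ [cur.reverse ++ l.takeWhile (· != ':'), (l.dropWhile (· != ':')).tail] := by
  intro fuel
  induction fuel with
  | zero =>
    intro l cur acc h hm
    have : l = [] := List.eq_nil_of_length_eq_zero (Nat.le_zero.mp h)
    subst this; simp at hm
  | succ n ih =>
    intro l cur acc h hm
    cases l with
    | nil => simp at hm
    | cons c r =>
      by_cases hc : c = ':'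
      · subst hc
        have hpre : List.isPrefixOf [':'] (':' :: r) = true := by simp [List.isPrefixOf]
        simp only [PySem.Chars.splitOnMax.go, hpre, if_pos, List.length_cons, List.length_nil,
          List.drop_succ_cons, List.drop_zero]
        rw [if_neg (by norm_num), pvGoMax0]
        simp [List.takeWhile]
      · have hpre : List.isPrefixOf [':'] (c :: r) = false := by
          simp [List.isPrefixOf]; exact fun hh => hc hh.symm
        have hmr : ':' ∈ r := by
          cases hm with
          | head => exact absurd rfl hc
          | tail _ hh => exact hh
        simp only [PySem.Chars.splitOnMax.go]
        rw [if_neg (by norm_num), if_neg (by simp [hpre])]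
        rw [ih r (c :: cur) acc (by simpa using Nat.le_of_succ_le_succ h) hmr]
        have hcb : (c != ':') = true := by simp [hc]
        simp [List.takeWhile, hcb]

theorem pvMemIsIn (e : List Char) : PySem.Chars.isIn [':'] e = true ↔ ':' ∈ e := by
  rw [PySem.Chars.isIn_iff_infix]
  constructor
  · intro h; exact h.mem (by simp)
  · intro h
    obtain ⟨s, t, rfl⟩ := List.append_of_mem h
    exact ⟨s, t, by simp⟩

theorem pvSegAEq (e : List Char) : pvSegA e = pvSegF e := by
  unfold pvSegA pvSegF
  by_cases hm : ':' ∈ e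
  · rw [if_pos ((pvMemIsIn e).mpr hm), if_pos hm]
    have hsplit : PySem.Chars.splitOnMax e [':'] 1 =
        [e.takeWhile (· != ':'), (e.dropWhile (· != ':')).tail] := by
      unfold PySem.Chars.splitOnMax
      rw [if_neg (by norm_num)]
      simpa using pvGoMax1 (e.length + 1) e [] [] (Nat.le_succ _) hm
    rw [hsplit]
    simp [PySem.List.pyGet?, PySem.List.pyIdx?]
  · rw [if_neg (by simp [pvMemIsIn, hm]), if_neg hm]

theorem pvSplitsNeNil : ∀ (l cur : List Char), pvSplits l cur ≠ [] := by
  intro l; induction l with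
  | nil => intro cur; simp [pvSplits]
  | cons c r ih =>
    intro cur
    by_cases hc : c = '/' <;> simp [pvSplits, hc, ih]

theorem pvDropColon : ∀ (pre mid : List Char), ':' ∉ pre →
    (pre ++ ':' :: mid).dropWhile (· != ':') = ':' :: mid := by
  intro pre; induction pre with
  | nil => intro mid _; simp
  | cons p ps ih =>
    intro mid h
    have hp : p ≠ ':' := fun hh => h (by simp [hh])
    have hps : ':' ∉ ps := fun hh => h (by simp [hh])
    simp [hp, ih mid hps]

theorem pvSegFNoColon (buf : List Char) (h : ':' ∉ buf) : pvSegF buf = buf := by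
  unfold pvSegF; rw [if_neg h]

theorem pvSegFColon (pre mid : List Char) (h : ':' ∉ pre) :
    pvSegF (pre ++ ':' :: mid) = mid := by
  unfold pvSegF
  rw [if_pos (by simp), pvDropColon pre mid h]
  rfl

theorem pvJoinCons (a : List Char) (b : List Char) (rest : List (List Char)) :
    PySem.Chars.join ['/'] (a :: b :: rest) = a ++ '/' :: PySem.Chars.join ['/'] (b :: rest) := by
  simp [PySem.Chars.join, List.intercalate]

@[simp] theorem pvJoinSingleton_simp (a : List Char) : PySem.Chars.join ['/'] [a] = a := by
  simp [PySem.Chars.join, List.intercalate]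

theorem pvMain : ∀ (n : Nat) (l : List Char), l.length ≤ n →
    (∀ buf, ':' ∉ buf →
      PySem.Chars.join ['/'] ((pvSplits l buf).map pvSegF) = pvBF l buf) ∧
    (∀ pre mid, ':' ∉ pre →
      PySem.Chars.join ['/'] ((pvSplits l (pre ++ ':' :: mid)).map pvSegF) = mid ++ pvBT l) := by
  intro n
  induction n with
  | zero =>
    intro l h
    have : l = [] := List.eq_nil_of_length_eq_zero (Nat.le_zero.mp h)
    subst this
    constructor
    · intro buf hb
      simp [pvSplits, pvBF, pvSegFNoColon buf hb]
    · intro pre mid hp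
      simp [pvSplits, pvBT, pvSegFColon pre mid hp]
  | succ m ih =>
    intro l h
    cases l with
    | nil =>
      constructor
      · intro buf hb
        simp [pvSplits, pvBF, pvSegFNoColon buf hb]
      · intro pre mid hp
        simp [pvSplits, pvBT, pvSegFColon pre mid hp]
    | cons c r =>
      have hr : r.length ≤ m := by simpa using Nat.le_of_succ_le_succ h
      constructor
      · intro buf hb
        by_cases hc : c = '/'
        · subst hc
          rw [show pvSplits ('/' :: r) buf = buf :: pvSplits r [] by simp [pvSplits]]
          rw [show pvBF ('/' :: r) buf = buf ++ '/' :: pvBF r [] by simp [pvBF]]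
          obtain ⟨b, bs, hbs⟩ := List.exists_cons_of_ne_nil (pvSplitsNeNil r [])
          rw [List.map_cons, hbs, List.map_cons, pvJoinCons, ← List.map_cons, ← hbs]
          rw [(ih r hr).1 [] (by simp), pvSegFNoColon buf hb]
        · by_cases hcc : c = ':'
          · subst hcc
            rw [show pvSplits (':' :: r) buf = pvSplits r (buf ++ [':']) by simp [pvSplits, hc]]
            rw [show pvBF (':' :: r) buf = pvBT r by simp [pvBF, hc]]
            have := (ih r hr).2 buf [] hb
            simpa using this
          · rw [show pvSplits (c :: r) buf = pvSplits r (buf ++ [c]) by simp [pvSplits, hc]]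
            rw [show pvBF (c :: r) buf = pvBF r (buf ++ [c]) by simp [pvBF, hc, hcc]]
            exact (ih r hr).1 (buf ++ [c]) (by simp [hb, Ne.symm hcc])
      · intro pre mid hp
        by_cases hc : c = '/'
        · subst hc
          rw [show pvSplits ('/' :: r) (pre ++ ':' :: mid) = (pre ++ ':' :: mid) :: pvSplits r [] by
            simp [pvSplits]]
          rw [show pvBT ('/' :: r) = '/' :: pvBF r [] by simp [pvBT]]
          obtain ⟨b, bs, hbs⟩ := List.exists_cons_of_ne_nil (pvSplitsNeNil r [])
          rw [List.map_cons, hbs, List.map_cons, pvJoinCons, ← List.map_cons, ← hbs]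
          rw [(ih r hr).1 [] (by simp), pvSegFColon pre mid hp]
        · rw [show pvSplits (c :: r) (pre ++ ':' :: mid) = pvSplits r (pre ++ ':' :: (mid ++ [c])) by
            simp [pvSplits, hc]]
          rw [show pvBT (c :: r) = c :: pvBT r by simp [pvBT, hc]]
          rw [(ih r hr).2 pre (mid ++ [c]) hp]
          simp

theorem pvFoldB : ∀ (l : List Char),
    (∀ out buf, (l.foldl pvStepB (out, buf, false)).1 ++ (l.foldl pvStepB (out, buf, false)).2.1
        = out ++ pvBF l buf) ∧
    (∀ out buf, (l.foldl pvStepB (out, buf, true)).1 ++ (l.foldl pvStepB (out, buf, true)).2.1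
        = out ++ buf ++ pvBT l) := by
  intro l
  induction l with
  | nil => constructor <;> intro out buf <;> simp [pvBF, pvBT]
  | cons c r ih =>
    constructor
    · intro out buf
      by_cases hc : c = '/'
      · subst hc
        simp only [List.foldl, pvStepB, beq_self_eq_true, if_pos]
        rw [ih.1 (out ++ buf ++ ['/']) []]
        simp [pvBF]
      · by_cases hcc : c = ':'
        · subst hcc
          simp only [List.foldl]
          rw [show pvStepB (out, buf, false) ':' = (out, [], true) by simp [pvStepB]]
          rw [ih.2 out []]
          simp [pvBF]
        · simp only [List.foldl]
          rw [show pvStepB (out, buf, false) c = (out, buf ++ [c], false) by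
            simp [pvStepB, hc, hcc]]
          rw [ih.1 out (buf ++ [c])]
          simp [pvBF, hc, hcc]
    · intro out buf
      by_cases hc : c = '/'
      · subst hc
        simp only [List.foldl, pvStepB, beq_self_eq_true, if_pos]
        rw [ih.1 (out ++ buf ++ ['/']) []]
        simp [pvBT]
      · simp only [List.foldl]
        rw [show pvStepB (out, buf, true) c = (out, buf ++ [c], true) by simp [pvStepB, hc]]
        rw [ih.2 out (buf ++ [c])]
        simp [pvBT, hc]

-- ===== VERDICT (by name: the statement is the Claim_ definition above) =====
theorem remove_module_name_from_xpath_spec : Claim_equal_remove_module_name_from_xpath := by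
  unfold Claim_equal_remove_module_name_from_xpath
  intro path _
  unfold Spec_remove_module_name_from_xpath
  unfold remove_module_name_from_xpath remove_module_name_from_xpath_alt
  rw [pvSplitOnEq, pvFoldlAppendMap pvSegA]
  rw [show (pvSplits path.toList []).map pvSegA = (pvSplits path.toList []).map pvSegF by
    exact List.map_congr_left fun e _ => pvSegAEq e]
  have h1 := (pvMain path.toList.length path.toList le_rfl).1 [] (by simp)
  have h2 := (pvFoldB path.toList).1 [] []
  simp only [List.nil_append] at h1 h2 ⊢
  rw [h1, h2]
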